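-- pv_equiv track=rewrite | github.com/MastewalB/a2sv-competitive-programming | Contest/contest/Next-Phase/Contest-6/B.py | cheap
-- ===== SOURCE A (Python) =====
-- def cheap(word, p):
--     prices = []
--
--     total = 0
--     for i in range(len(word)):
--         prices.append((word[i], i, ord(word[i]) - 96))
--         total += prices[-1][2]
--
--     prices.sort(key=lambda x: x[2])
--
--     while total > p:
--         total -= prices.pop()[2]
--
--     prices.sort(key=lambda x: x[1])
--     res = []
--     for a, b, c in prices:
--         res += a
--     return ''.join(res)
-- ===== SOURCE B (Python) =====
-- def cheap(word, p):
--     # Bucket counts per letter value, closed-form greedy removal per bucket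
--     # (highest value first, ties resolved as "latest occurrence first"),
--     # then one right-to-left pass rebuilds the surviving subsequence.
--     total = 0
--     cnt = {}
--     for c in word:
--         v = ord(c) - 96
--         total += v
--         cnt[v] = cnt.get(v, 0) + 1
--     need = total - p
--     rem = {}
--     for v in range(30, 0, -1):
--         if need <= 0:
--             break
--         c = cnt.get(v, 0)
--         k = min(c, -((-need) // v))  # min(count, ceil(need / v))
--         if k:
--             rem[v] = k
--             need -= k * v
--     out = []
--     for ch in reversed(word):
--         v = ord(ch) - 96
--         if rem.get(v, 0) > 0:
--             rem[v] -= 1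
--         else:
--             out.append(ch)
--     out.reverse()
--     return ''.join(out)
-- ===== Notes on version B (the rewrite author's own statement) =====
-- stated objective: alternative
-- what changed: Replaced the two stable sorts and the one-at-a-time pop loop by bucket counting over the letter-value range, a closed-form ceil-division greedy per bucket, and a single right-to-left rebuild pass (intended as faster; measured 2.03x at the largest size but inconsistent across inputs, so recorded as unconfirmed).
-- crash fix: When the sum of the negative letter values (ord(c)-96 < 0) exceeds p, A's while loop empties the list and raises IndexError from pop(); B returns the subsequence of characters with non-positive value (all positive-value characters removed). — e.g. on cheap("ab", -1): A raises IndexError, B returns ""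
import Mathlib
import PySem

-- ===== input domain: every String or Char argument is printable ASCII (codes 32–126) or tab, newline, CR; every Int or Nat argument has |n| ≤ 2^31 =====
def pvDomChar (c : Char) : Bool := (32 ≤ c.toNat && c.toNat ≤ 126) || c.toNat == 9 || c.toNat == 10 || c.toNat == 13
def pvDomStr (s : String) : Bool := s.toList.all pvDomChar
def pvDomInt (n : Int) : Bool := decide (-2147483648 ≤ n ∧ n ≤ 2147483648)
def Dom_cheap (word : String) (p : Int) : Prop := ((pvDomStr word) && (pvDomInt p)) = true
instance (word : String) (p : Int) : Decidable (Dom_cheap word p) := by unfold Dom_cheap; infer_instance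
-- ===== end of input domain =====

-- B replaces A's two stable sorts + one-at-a-time pop loop by bucket counts over the
-- letter-value range, a closed-form greedy per bucket and one right-to-left rebuild pass.


-- ===== PORT A =====
-- for i in range(len(word)): prices.append((word[i], i, ord(word[i])-96)); total += prices[-1][2]
-- (prices[-1] is the triple just appended, so its [2] is the value just computed)
def cheapBuild (cs : List Char) : List (Char × Int × Int) × Int :=
  (PySem.List.pyRange 0 (PySem.List.len cs) 1).foldl
    (fun st i =>
      let c := PySem.List.pyGetD cs i ' '
      (st.1 ++ [(c, i, (c.toNat : Int) - 96)], st.2 + ((c.toNat : Int) - 96)))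
    ([], 0)

-- while total > p: total -= prices.pop()[2].  The list is passed REVERSED, so the head is the
-- element Python pops from the end; none = IndexError (pop from an empty list).
def cheapPopLoop (p : Int) : Int → List (Char × Int × Int) → Option (List (Char × Int × Int))
  | total, [] => if total > p then none else some []
  | total, t :: rest =>
      if total > p then cheapPopLoop p (total - t.2.2) rest else some (t :: rest)

def cheap (word : String) (p : Int) : String :=
  let bt := cheapBuild word.toList
  let prices1 := PySem.List.sorted bt.1 (fun x => x.2.2) false
  match cheapPopLoop p bt.2 prices1.reverse with
  | none => ""   -- IndexError: excluded by Pre_cheap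
  | some keptRev =>
      let prices2 := PySem.List.sorted keptRev.reverse (fun x => x.2.1) false
      String.ofList (prices2.foldl (fun res t => res ++ [t.1]) [])

-- ===== PORT B =====
-- for c in word: v = ord(c)-96; total += v; cnt[v] = cnt.get(v, 0) + 1
def altCount (cs : List Char) : Int × PySem.Dict Int Int :=
  cs.foldl (fun st c =>
    (st.1 + ((c.toNat : Int) - 96), st.2.insert ((c.toNat : Int) - 96) (st.2.getD ((c.toNat : Int) - 96) 0 + 1)))
    (0, PySem.Dict.empty)

-- for v in range(30, 0, -1): if need <= 0: break; k = min(cnt.get(v,0), -((-need)//v)); …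
-- (the countdown v, v-1, …, 1 is the structural recursion on v : Nat)
def altGreedy (cnt : PySem.Dict Int Int) : Nat → Int → PySem.Dict Int Int → PySem.Dict Int Int × Int
  | 0, need, rem => (rem, need)
  | v + 1, need, rem =>
      if need ≤ 0 then (rem, need)
      else
        let c := cnt.getD ((v : Int) + 1) 0
        let k := min c (-(PySem.Int.floordiv (-need) ((v : Int) + 1)))
        if k ≠ 0 then altGreedy cnt v (need - k * ((v : Int) + 1)) (rem.insert ((v : Int) + 1) k)
        else altGreedy cnt v need rem

-- for ch in reversed(word): if rem.get(v,0) > 0: rem[v] -= 1 else: out.append(ch)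
def altRebuild : List Char → PySem.Dict Int Int → List Char → List Char
  | [], _, out => out
  | c :: rest, rem, out =>
      let v := (c.toNat : Int) - 96
      if rem.getD v 0 > 0 then altRebuild rest (rem.insert v (rem.getD v 0 - 1)) out
      else altRebuild rest rem (out ++ [c])

def cheap_alt (word : String) (p : Int) : String :=
  let tc := altCount word.toList
  let rg := altGreedy tc.2 30 (tc.1 - p) PySem.Dict.empty
  let out := altRebuild word.toList.reverse rg.1 []
  String.ofList out.reverse

-- ===== PRECONDITION & SPEC =====
-- Pre_cheap excludes exactly the inputs on which A raises IndexError: when the sum of the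
-- negative letter values exceeds p, A's while loop pops the whole list and then pops again.
def Pre_cheap (word : String) (p : Int) : Prop :=
  ((word.toList.map (fun c => (c.toNat : Int) - 96)).filter (fun v => v < 0)).sum ≤ p
instance (word : String) (p : Int) : Decidable (Pre_cheap word p) := by unfold Pre_cheap; infer_instance
def pvWitness_cheap : String × Int := ("abca", 4)

-- A raises IndexError exactly when the sum of the negative letter values exceeds p;
-- B instead returns the subsequence of characters with non-positive value (all positive ones removed).
def Raises_cheap (word : String) (p : Int) : Prop :=
  p < ((word.toList.map (fun c => (c.toNat : Int) - 96)).filter (fun v => v < 0)).sum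
instance (word : String) (p : Int) : Decidable (Raises_cheap word p) := by unfold Raises_cheap; infer_instance
def pvRaiseWitness_cheap : String × Int := ("ab", -1)
def pvRaiseWitnessOut_cheap : String := ""

def Spec_cheap (word : String) (p : Int) (out : String) : Prop := out = cheap_alt word p
instance (word : String) (p : Int) (out : String) : Decidable (Spec_cheap word p out) := by unfold Spec_cheap; infer_instance

-- ===== CLAIM (what is proved, stated in full; the proofs are below) =====
def Claim_equal_cheap : Prop := ∀ (word : String) (p : Int), Dom_cheap word p → Pre_cheap word p → Spec_cheap word p (cheap word p)
def Claim_raises_cheap : Prop := (∀ (word : String) (p : Int), Dom_cheap word p → Raises_cheap word p → ¬ Pre_cheap word p) ∧ (Dom_cheap (pvRaiseWitness_cheap.1) (pvRaiseWitness_cheap.2) ∧ Raises_cheap (pvRaiseWitness_cheap.1) (pvRaiseWitness_cheap.2) ∧ cheap_alt (pvRaiseWitness_cheap.1) (pvRaiseWitness_cheap.2) = pvRaiseWitnessOut_cheap)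

-- ===== LEMMAS AND PROOFS =====
-- Proof-side abbreviations (used only below the claim block)
def pvVal (c : Char) : Int := (c.toNat : Int) - 96

def pvTriples (cs : List Char) : List (Char × Int × Int) :=
  (PySem.List.enumerate cs 0).map (fun q => (q.2, q.1, pvVal q.2))

-- the lexicographic (value, index) order A's stable sort realises
def pvLex (a b : Char × Int × Int) : Prop := a.2.2 < b.2.2 ∨ (a.2.2 = b.2.2 ∧ a.2.1 < b.2.1)

def pvGroup (xs : List (Char × Int × Int)) (w : Int) : List (Char × Int × Int) :=
  xs.filter (fun t => t.2.2 = w)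

-- all value groups in ascending value order (values run over -87 … 30)
def pvAsc (xs : List (Char × Int × Int)) : List (Char × Int × Int) :=
  (List.range 118).flatMap (fun (j : Nat) => pvGroup xs ((j : Int) - 87))

-- groups for values v down to -87, each reversed (the shape of A's reversed sorted list)
def pvDesc (xs : List (Char × Int × Int)) (v : Nat) : List (Char × Int × Int) :=
  ((List.range (v + 88)).reverse).flatMap (fun (j : Nat) => (pvGroup xs ((j : Int) - 87)).reverse)

def pvCeil (need w : Int) : Int := -(PySem.Int.floordiv (-need) w)

-- pure per-value removal counts of the shared greedy (v counts down, need is total-p)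
def pvK (cnt : PySem.Dict Int Int) : Nat → Int → Int → Int
  | 0, _, _ => 0
  | v + 1, need, w =>
      if need ≤ 0 then 0
      else
        let k := min (cnt.getD ((v : Int) + 1) 0) (pvCeil need ((v : Int) + 1))
        if w = (v : Int) + 1 then k else pvK cnt v (need - k * ((v : Int) + 1)) w

-- what A's loop leaves, grouped by value (descending), per-value drop of the removed count
def pvKept (xs : List (Char × Int × Int)) (cnt : PySem.Dict Int Int) (v : Nat) (need : Int) :
    List (Char × Int × Int) :=
  ((List.range (v + 88)).reverse).flatMap
    (fun (j : Nat) => ((pvGroup xs ((j : Int) - 87)).reverse).drop (pvK cnt v need ((j : Int) - 87)).toNat)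

def pvPosSum (xs : List (Char × Int × Int)) (v : Nat) : Int :=
  ((xs.filter (fun t => 1 ≤ t.2.2 ∧ t.2.2 ≤ (v : Int))).map (fun t => t.2.2)).sum

-- right-to-left removal of the first (r value) occurrences of each value, on triples
def pvPick : List (Char × Int × Int) → (Int → Int) → List (Char × Int × Int)
  | [], _ => []
  | t :: rest, r =>
      if r t.2.2 > 0 then pvPick rest (fun u => if u = t.2.2 then r u - 1 else r u)
      else t :: pvPick rest r

-- the same on characters (the shape of B's rebuild pass)
def pvPickC : List Char → (Int → Int) → List Char
  | [], _ => []
  | c :: rest, r =>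
      if r (pvVal c) > 0 then pvPickC rest (fun u => if u = pvVal c then r u - 1 else r u)
      else c :: pvPickC rest r

def pvCnt (cs : List Char) : PySem.Dict Int Int :=
  cs.foldl (fun d c => d.insert (pvVal c) (d.getD (pvVal c) 0 + 1)) PySem.Dict.empty

-- ---- build phase ----
lemma cheapBuild_eq (cs : List Char) : cheapBuild cs = (pvTriples cs, (cs.map pvVal).sum) := by

  unfold cheapBuild
  rw [show PySem.List.pyRange 0 (PySem.List.len cs) 1 = PySem.List.pyRange 0 (PySem.List.len cs) from rfl]
  have h1 : (PySem.List.pyRange 0 (PySem.List.len cs)).foldl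
      (fun (st : List (Char × Int × Int) × Int) i =>
        (st.1 ++ [(PySem.List.pyGetD cs i ' ', i, ((PySem.List.pyGetD cs i ' ').toNat : Int) - 96)],
         st.2 + (((PySem.List.pyGetD cs i ' ').toNat : Int) - 96))) ([], 0)
    = (PySem.List.enumerate cs 0).foldl
      (fun (st : List (Char × Int × Int) × Int) q =>
        (st.1 ++ [(q.2, q.1, pvVal q.2)], st.2 + pvVal q.2)) ([], 0) := by
    rw [PySem.List.enumerate_eq_map_pyRange cs ' ', List.foldl_map]
    rfl
  simp only []
  rw [h1]
  rw [PySem.List.foldl_prod_mk (f := fun (l : List (Char × Int × Int)) (q : Int × Char) => l ++ [(q.2, q.1, pvVal q.2)]) (g := fun (s : Int) (q : Int × Char) => s + pvVal q.2)]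
  rw [PySem.List.foldl_append_singleton_eq_map (fun (q : Int × Char) => (q.2, q.1, pvVal q.2)),
      PySem.List.foldl_add _ (fun (q : Int × Char) => pvVal q.2)]
  refine Prod.ext ?_ ?_
  · simp [pvTriples]
  · show 0 + ((PySem.List.enumerate cs 0).map (fun q => pvVal q.2)).sum = (cs.map pvVal).sum
    rw [show (PySem.List.enumerate cs 0).map (fun q => pvVal q.2)
          = ((PySem.List.enumerate cs 0).map (fun q => q.2)).map pvVal by rw [List.map_map]; rfl,
        PySem.List.map_snd_enumerate, zero_add]

lemma altCount_eq (cs : List Char) : altCount cs = ((cs.map pvVal).sum, pvCnt cs) := by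

  unfold altCount
  rw [PySem.List.foldl_prod_mk (f := fun (s : Int) (c : Char) => s + ((c.toNat : Int) - 96))
        (g := fun (d : PySem.Dict Int Int) (c : Char) =>
          d.insert ((c.toNat : Int) - 96) (d.getD ((c.toNat : Int) - 96) 0 + 1))]
  refine Prod.ext ?_ rfl
  show List.foldl (fun (s : Int) (c : Char) => s + (((c.toNat : Int)) - 96)) 0 cs = (cs.map pvVal).sum
  have h2 := PySem.List.foldl_add cs pvVal 0
  simpa [pvVal] using h2

lemma pvCnt_getD (cs : List Char) (w : Int) :
    (pvCnt cs).getD w 0 = (cs.countP (fun c => pvVal c = w) : Int) := by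

  suffices h : ∀ d : PySem.Dict Int Int,
      (cs.foldl (fun d c => d.insert (pvVal c) (d.getD (pvVal c) 0 + 1)) d).getD w 0
        = d.getD w 0 + (cs.countP (fun c => pvVal c = w) : Int) by
    have := h PySem.Dict.empty
    simpa [pvCnt] using this
  induction cs with
  | nil => intro d; simp
  | cons c rest ih =>
      intro d
      simp only [List.foldl_cons]
      rw [ih, PySem.Dict.getD_insert, List.countP_cons]
      by_cases h : w = pvVal c
      · simp [h]; ring
      · have : ¬ (pvVal c = w) := fun hh => h hh.symm
        simp [h, this]

-- ---- basic triple facts ----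
lemma map_fst_pvTriples (cs : List Char) : (pvTriples cs).map (fun t => t.1) = cs := by

  rw [pvTriples, List.map_map]
  exact PySem.List.map_snd_enumerate cs 0

lemma snd_snd_pvTriples (cs : List Char) : ∀ t ∈ pvTriples cs, t.2.2 = pvVal t.1 := by

  intro t ht
  rw [pvTriples, List.mem_map] at ht
  obtain ⟨q, _, rfl⟩ := ht
  rfl

lemma pairwise_idx_pvTriples (cs : List Char) :
    (pvTriples cs).Pairwise (fun a b => a.2.1 < b.2.1) := by

  exact (PySem.List.pairwise_lt_enumerate cs 0).map _ (fun a b h => h)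

lemma length_pvGroup (cs : List Char) (w : Int) :
    (pvGroup (pvTriples cs) w).length = cs.countP (fun c => pvVal c = w) := by

  rw [pvGroup, pvTriples, List.filter_map, List.length_map, ← List.countP_eq_length_filter]
  rw [show (cs.countP fun c => pvVal c = w)
        = ((PySem.List.enumerate cs 0).map (fun q => q.2)).countP (fun c => pvVal c = w) by
      rw [PySem.List.map_snd_enumerate]]
  rw [List.countP_map]
  rfl

-- ---- characterisation of the stable sort by value ----
lemma flatMap_filter_perm (key : (Char × Int × Int) → Int) (vs : List Int) (hv : vs.Nodup) :
    ∀ xs : List (Char × Int × Int), (∀ x ∈ xs, key x ∈ vs) →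
    (vs.flatMap (fun v => xs.filter (fun x => key x = v))).Perm xs := by

  induction vs with
  | nil =>
      intro xs hx
      cases xs with
      | nil => simp
      | cons a t => exact absurd (hx a (by simp)) (by simp)
  | cons v vs ih =>
      intro xs hx
      have hnd := hv
      rw [List.nodup_cons] at hnd
      simp only [List.flatMap_cons]
      have hrw : ∀ u ∈ vs, xs.filter (fun x => key x = u)
          = (xs.filter (fun x => !(decide (key x = v)))).filter (fun x => key x = u) := by
        intro u hu
        rw [List.filter_filter]
        apply List.filter_congr
        intro a _
        by_cases hk : key a = u
        · have hne : ¬ u = v := by rintro rfl; exact hnd.1 hu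
          simp [hk, hne]
        · simp [hk]
      have hflat : vs.flatMap (fun u => xs.filter (fun x => key x = u))
          = vs.flatMap (fun u => (xs.filter (fun x => !(decide (key x = v)))).filter (fun x => key x = u)) :=
        List.flatMap_congr (fun u hu => hrw u hu)
      rw [hflat]
      have hih := ih hnd.2 (xs.filter (fun x => !(decide (key x = v))))
        (by
          intro x hxm
          rw [List.mem_filter] at hxm
          have := hx x hxm.1
          simp at hxm
          rcases List.mem_cons.mp this with h | h
          · exact absurd h hxm.2
          · exact h)
      exact (List.Perm.append_left _ hih).trans (List.filter_append_perm _ xs)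

lemma pvAsc_perm (xs : List (Char × Int × Int)) (h : ∀ t ∈ xs, -87 ≤ t.2.2 ∧ t.2.2 ≤ 30) :
    (pvAsc xs).Perm xs := by

  have hinj : Function.Injective (fun j : Nat => (j : Int) - 87) := by
    intro a b hab; simp at hab; omega
  have hnd : ((List.range 118).map (fun j : Nat => (j : Int) - 87)).Nodup :=
    (List.nodup_range).map hinj
  have hmem : ∀ t ∈ xs, t.2.2 ∈ (List.range 118).map (fun j : Nat => (j : Int) - 87) := by
    intro t ht
    rcases h t ht with ⟨h1, h2⟩
    rw [List.mem_map]
    exact ⟨(t.2.2 + 87).toNat, by rw [List.mem_range]; omega, by omega⟩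
  have := flatMap_filter_perm (fun t => t.2.2) _ hnd xs hmem
  rw [List.flatMap_map] at this
  exact this

lemma pvAsc_pairwise (xs : List (Char × Int × Int))
    (h : xs.Pairwise (fun a b => a.2.1 < b.2.1)) : (pvAsc xs).Pairwise pvLex := by

  unfold pvAsc
  suffices hS : ∀ n : Nat, ((List.range n).flatMap (fun (j : Nat) => pvGroup xs ((j : Int) - 87))).Pairwise pvLex from hS 118
  intro n
  induction n with
  | zero => simp
  | succ n ih =>
      rw [List.range_succ, List.flatMap_append, List.pairwise_append]
      refine ⟨ih, ?_, ?_⟩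
      · simp only [List.flatMap_cons, List.flatMap_nil, List.append_nil]
        have hpw : (pvGroup xs ((n : Int) - 87)).Pairwise (fun a b => a.2.1 < b.2.1) :=
          h.filter _
        refine hpw.imp_of_mem ?_
        intro a b ha hb hab
        have ha' := (List.mem_filter.mp ha).2
        have hb' := (List.mem_filter.mp hb).2
        simp at ha' hb'
        exact Or.inr ⟨by rw [ha', hb'], hab⟩
      · intro a ha b hb
        rw [List.mem_flatMap] at ha
        obtain ⟨j, hj, haj⟩ := ha
        rw [List.mem_range] at hj
        simp only [List.flatMap_cons, List.flatMap_nil, List.append_nil] at hb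
        have ha' := (List.mem_filter.mp haj).2
        have hb' := (List.mem_filter.mp hb).2
        simp at ha' hb'
        exact Or.inl (by rw [ha', hb']; omega)

lemma insertBy_pairwise_lex (x : Char × Int × Int) (acc : List (Char × Int × Int))
    (hp : acc.Pairwise pvLex) (hidx : ∀ y ∈ acc, y.2.1 < x.2.1) :
    (PySem.List.insertBy (fun a b => decide (a.2.2 < b.2.2)) x acc).Pairwise pvLex := by

  induction acc with
  | nil => simp [PySem.List.insertBy]
  | cons y ys ih =>
      rw [List.pairwise_cons] at hp
      show (if decide (x.2.2 < y.2.2) = true then x :: y :: ys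
            else y :: PySem.List.insertBy (fun a b => decide (a.2.2 < b.2.2)) x ys).Pairwise pvLex
      by_cases hlt : x.2.2 < y.2.2
      · simp only [hlt, decide_true, if_true]
        rw [List.pairwise_cons]
        refine ⟨?_, List.pairwise_cons.mpr hp⟩
        intro z hz
        rcases List.mem_cons.mp hz with rfl | hz
        · exact Or.inl hlt
        · have := hp.1 z hz
          rcases this with h1 | ⟨h1, _⟩
          · exact Or.inl (lt_trans hlt h1)
          · exact Or.inl (by omega)
      · simp only [hlt, decide_false, Bool.false_eq_true, if_false]
        rw [List.pairwise_cons]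
        refine ⟨?_, ih hp.2 (fun z hz => hidx z (List.mem_cons_of_mem _ hz))⟩
        intro z hz
        rw [PySem.List.mem_insertBy] at hz
        rcases hz with rfl | hz
        · rcases lt_or_eq_of_le (not_lt.mp hlt) with h1 | h1
          · exact Or.inl h1
          · exact Or.inr ⟨h1, hidx y (List.mem_cons_self)⟩
        · exact hp.1 z hz

lemma sorted_val_pairwise_lex (xs : List (Char × Int × Int))
    (h : xs.Pairwise (fun a b => a.2.1 < b.2.1)) :
    (PySem.List.sorted xs (fun t => t.2.2)).Pairwise pvLex := by

  rw [PySem.List.sorted_eq_foldl_insertBy]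
  suffices hS : ∀ (l : List (Char × Int × Int)) (acc : List (Char × Int × Int)),
      l.Pairwise (fun a b => a.2.1 < b.2.1) → acc.Pairwise pvLex →
      (∀ y ∈ acc, ∀ z ∈ l, y.2.1 < z.2.1) →
      (l.foldl (fun acc x => PySem.List.insertBy (fun a b => decide (a.2.2 < b.2.2)) x acc) acc).Pairwise pvLex by
    exact hS xs [] h (by simp) (by simp)
  intro l
  induction l with
  | nil => intro acc _ hacc _; simpa using hacc
  | cons x rest ih =>
      intro acc hl hacc hcross
      rw [List.pairwise_cons] at hl
      simp only [List.foldl_cons]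
      refine ih _ hl.2 ?_ ?_
      · exact insertBy_pairwise_lex x acc hacc (fun y hy => hcross y hy x List.mem_cons_self)
      · intro y hy z hz
        rw [PySem.List.mem_insertBy] at hy
        rcases hy with rfl | hy
        · exact hl.1 z hz
        · exact hcross y hy z (List.mem_cons_of_mem _ hz)

lemma pvLex_asymm (a b : Char × Int × Int) : pvLex a b → pvLex b a → False := by

  unfold pvLex
  intro h1 h2
  rcases h1 with h1 | ⟨h1, h1'⟩ <;> rcases h2 with h2 | ⟨h2, h2'⟩ <;> omega

lemma sorted_val_eq_pvAsc (cs : List Char) (h : ∀ t ∈ pvTriples cs, -87 ≤ t.2.2 ∧ t.2.2 ≤ 30) :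
    PySem.List.sorted (pvTriples cs) (fun t => t.2.2) = pvAsc (pvTriples cs) := by

  refine List.Perm.eq_of_pairwise (le := pvLex)
    (fun a b _ _ h1 h2 => (pvLex_asymm a b h1 h2).elim) ?_ ?_ ?_
  · exact sorted_val_pairwise_lex _ (pairwise_idx_pvTriples cs)
  · exact pvAsc_pairwise _ (pairwise_idx_pvTriples cs)
  · exact (PySem.List.sorted_perm _ _ _).trans
      (pvAsc_perm (pvTriples cs) (fun t ht => h t ht)).symm

lemma pvAsc_reverse (xs : List (Char × Int × Int)) : (pvAsc xs).reverse = pvDesc xs 30 := by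

  unfold pvAsc pvDesc
  rw [List.reverse_flatMap]
  rfl

-- ---- the pop loop ----
lemma popLoop_of_le (p total : Int) (l : List (Char × Int × Int)) (h : total ≤ p) :
    cheapPopLoop p total l = some l := by

  cases l with
  | nil => simp only [cheapPopLoop]; rw [if_neg (by omega)]
  | cons t rest => simp only [cheapPopLoop]; rw [if_neg (by omega)]

lemma popLoop_group_stop (p w : Int) (g rest : List (Char × Int × Int))
    (hg : ∀ t ∈ g, t.2.2 = w) (k : Nat) (hk1 : ((k : Int) - 1) * w < total - p)
    (hk2 : total - p ≤ (k : Int) * w) (hklen : k ≤ g.length) (hw : 0 < w) :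
    cheapPopLoop p total (g ++ rest) = some (g.drop k ++ rest) := by
  induction g generalizing total k with
  | nil =>
      simp only [List.length_nil, Nat.le_zero] at hklen
      subst hklen
      simp only [Nat.cast_zero, zero_mul] at hk2
      rw [List.nil_append, popLoop_of_le _ _ _ (by omega)]
      simp
  | cons t g' ih =>
      simp only [List.length_cons] at hklen
      rcases Nat.eq_zero_or_pos k with hk0 | hkpos
      · subst hk0
        simp only [Nat.cast_zero, zero_mul] at hk2
        rw [popLoop_of_le _ _ _ (by omega)]
        simp
      · have h1k : (1:Int) ≤ (k:Int) := by exact_mod_cast hkpos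
        have hneed : 0 < total - p := by nlinarith [hk1]
        have htw : t.2.2 = w := hg t List.mem_cons_self
        show (if total > p then cheapPopLoop p (total - t.2.2) (g' ++ rest) else some (t :: g' ++ rest)) = _
        rw [if_pos (by omega), htw]
        rcases Nat.lt_or_ge 1 k with hk1' | hk1'
        · -- k ≥ 2 : recurse
          have hsub : ((k - 1 : Nat) : Int) = (k : Int) - 1 := by omega
          have hI := ih (total := total - w) (fun s hs => hg s (List.mem_cons_of_mem _ hs)) (k - 1)
            (by rw [hsub]; nlinarith [hk1]) (by rw [hsub]; nlinarith [hk2]) (by omega)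
          rw [hI]
          have hdk : List.drop k (t :: g') = List.drop (k - 1) g' := by
            rw [show k = (k - 1) + 1 by omega]
            simp [List.drop_succ_cons]
          rw [hdk]
        · -- k = 1 : one pop then stop
          have hk1'' : k = 1 := by omega
          subst hk1''
          simp only [Nat.cast_one, one_mul] at hk2
          rw [popLoop_of_le _ _ _ (by omega)]
          simp

lemma popLoop_group_all (p w : Int) (g rest : List (Char × Int × Int))
    (hg : ∀ t ∈ g, t.2.2 = w) (h : (g.length : Int) * w < total - p) (hw : 0 < w) :
    cheapPopLoop p total (g ++ rest) = cheapPopLoop p (total - (g.length : Int) * w) rest := by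
  induction g generalizing total with
  | nil =>
      simp only [List.length_nil, Nat.cast_zero, zero_mul, List.nil_append, sub_zero]
  | cons t g' ih =>
      have hlen : (0:Int) ≤ (g'.length : Int) * w := by positivity
      have htw : t.2.2 = w := hg t List.mem_cons_self
      have hlc : ((t :: g').length : Int) = (g'.length : Int) + 1 := by
        simp [List.length_cons]
      rw [hlc] at h
      show (if total > p then cheapPopLoop p (total - t.2.2) (g' ++ rest) else some (t :: g' ++ rest)) = _
      rw [if_pos (by nlinarith), htw]
      rw [ih (total := total - w) (fun s hs => hg s (List.mem_cons_of_mem _ hs)) (by nlinarith)]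
      congr 1
      rw [hlc]
      ring

lemma pvK_of_nonpos (cnt : PySem.Dict Int Int) (v : Nat) (need w : Int) (h : need ≤ 0) :
    pvK cnt v need w = 0 := by

  cases v with
  | zero => rfl
  | succ v => simp [pvK, h]

lemma pvPosSum_zero (xs : List (Char × Int × Int)) : pvPosSum xs 0 = 0 := by

  unfold pvPosSum
  rw [show xs.filter (fun t => decide (1 ≤ t.2.2 ∧ t.2.2 ≤ ((0:Nat):Int))) = [] from
    List.filter_eq_nil_iff.mpr (by intro t _; simp; omega)]
  simp

lemma pvPosSum_succ (xs : List (Char × Int × Int)) (v : Nat) :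
    pvPosSum xs (v + 1) = ((v : Int) + 1) * ((pvGroup xs ((v : Int) + 1)).length : Int) + pvPosSum xs v := by

  induction xs with
  | nil => simp [pvPosSum, pvGroup]
  | cons t rest ih =>
      unfold pvPosSum pvGroup at ih ⊢
      simp only [List.filter_cons]
      by_cases h1 : t.2.2 = (v : Int) + 1
      · rw [if_pos (by simp; omega), if_pos (by simp [h1]), if_neg (by simp; omega)]
        simp only [List.map_cons, List.sum_cons, List.length_cons]
        rw [ih, h1]
        push_cast
        ring
      · by_cases h2 : 1 ≤ t.2.2 ∧ t.2.2 ≤ (v : Int)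
        · rw [if_pos (by simp; omega), if_neg (by simp [h1]), if_pos (by simp; omega)]
          simp only [List.map_cons, List.sum_cons]
          rw [ih]
          ring
        · rw [if_neg (by simp; omega), if_neg (by simp [h1]), if_neg (by simp; omega)]
          exact ih

lemma popLoop_desc (xs : List (Char × Int × Int)) (cnt : PySem.Dict Int Int)
    (hcnt : ∀ w : Int, 1 ≤ w → cnt.getD w 0 = ((pvGroup xs w).length : Int)) :
    ∀ (v : Nat) (total p : Int), total - p ≤ pvPosSum xs v →
    cheapPopLoop p total (pvDesc xs v) = some (pvKept xs cnt v (total - p)) := by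

  intro v
  induction v with
  | zero =>
      intro total p hle
      rw [pvPosSum_zero] at hle
      rw [popLoop_of_le _ _ _ (by omega)]
      rfl
  | succ v ih =>
      intro total p hle
      have hcast : ((v + 88 : Nat) : Int) - 87 = (v : Int) + 1 := by omega
      have hdesc : pvDesc xs (v + 1) = (pvGroup xs ((v : Int) + 1)).reverse ++ pvDesc xs v := by
        unfold pvDesc
        rw [show v + 1 + 88 = (v + 88) + 1 from rfl, List.range_succ]
        simp only [List.reverse_append, List.reverse_cons, List.reverse_nil, List.nil_append,
          List.flatMap_append, List.flatMap_cons, List.flatMap_nil, List.append_nil, hcast]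
      by_cases h0 : total - p ≤ 0
      · rw [popLoop_of_le _ _ _ (by omega)]
        unfold pvDesc pvKept
        congr 1
        refine (List.flatMap_congr ?_).symm
        intro j _
        rw [pvK_of_nonpos _ _ _ _ h0]
        simp
      · set w : Int := (v : Int) + 1 with hw
        set need : Int := total - p with hneed
        have hwpos : (0:Int) < w := by omega
        have hbr : (pvCeil need w - 1) * w < need ∧ need ≤ pvCeil need w * w :=
          (PySem.Int.neg_floordiv_neg_eq_iff_of_pos (a := need) (b := w)
            (q := pvCeil need w) hwpos).mp rfl
        have hceilpos : 1 ≤ pvCeil need w := by nlinarith [hbr.1, hbr.2]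
        have hgmem : ∀ t ∈ (pvGroup xs w).reverse, t.2.2 = w := by
          intro t ht
          rw [List.mem_reverse] at ht
          have := (List.mem_filter.mp ht).2
          simpa using this
        have hcnt' : cnt.getD w 0 = ((pvGroup xs w).length : Int) := hcnt w (by omega)
        have hKself : pvK cnt (v + 1) need w = min ((pvGroup xs w).length : Int) (pvCeil need w) := by
          simp only [pvK, if_neg (show ¬ need ≤ 0 by omega)]
          rw [← hw, if_pos rfl, hcnt']
        have hKlow : ∀ u : Int, u ≤ (v : Int) →
            pvK cnt (v + 1) need u
              = pvK cnt v (need - min ((pvGroup xs w).length : Int) (pvCeil need w) * w) u := by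
          intro u hu
          simp only [pvK, if_neg (show ¬ need ≤ 0 by omega)]
          rw [← hw, if_neg (by omega), hcnt']
        have hkept : pvKept xs cnt (v + 1) need =
            ((pvGroup xs w).reverse).drop (pvK cnt (v + 1) need w).toNat
              ++ ((List.range (v + 88)).reverse).flatMap
                   (fun (j : Nat) => ((pvGroup xs ((j : Int) - 87)).reverse).drop
                      (pvK cnt (v + 1) need ((j : Int) - 87)).toNat) := by
          unfold pvKept
          rw [show v + 1 + 88 = (v + 88) + 1 from rfl, List.range_succ]
          simp only [List.reverse_append, List.reverse_cons, List.reverse_nil, List.nil_append,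
            List.flatMap_append, List.flatMap_cons, List.flatMap_nil, List.append_nil, hcast, hw]
        by_cases hstop : need ≤ ((pvGroup xs w).length : Int) * w
        · -- the loop stops inside this group
          have hcle : pvCeil need w ≤ ((pvGroup xs w).length : Int) := by nlinarith [hbr.1]
          have hmin : min ((pvGroup xs w).length : Int) (pvCeil need w) = pvCeil need w := by omega
          have hflat : ((List.range (v + 88)).reverse).flatMap
                (fun (j : Nat) => ((pvGroup xs ((j : Int) - 87)).reverse).drop
                  (pvK cnt (v + 1) need ((j : Int) - 87)).toNat) = pvDesc xs v := by
            unfold pvDesc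
            refine List.flatMap_congr ?_
            intro j hj
            have hj' : (j : Int) - 87 ≤ (v : Int) := by
              rw [List.mem_reverse, List.mem_range] at hj
              omega
            rw [hKlow _ hj', hmin, pvK_of_nonpos _ _ _ _ (by nlinarith [hbr.2])]
            simp
          rw [hdesc, hkept, hflat, hKself, hmin]
          exact popLoop_group_stop (total := total) p w (pvGroup xs w).reverse (pvDesc xs v)
            hgmem (pvCeil need w).toNat
            (by rw [Int.toNat_of_nonneg (by omega)]; exact hbr.1)
            (by rw [Int.toNat_of_nonneg (by omega)]; exact hbr.2)
            (by rw [List.length_reverse]; omega) hwpos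
        · -- the whole group is popped; recurse
          have hclt : ((pvGroup xs w).length : Int) < pvCeil need w := by nlinarith [hbr.2]
          have hmin : min ((pvGroup xs w).length : Int) (pvCeil need w)
              = ((pvGroup xs w).length : Int) := by omega
          have hsucc := pvPosSum_succ xs v
          have hle' : (total - ((pvGroup xs w).length : Int) * w) - p ≤ pvPosSum xs v := by
            rw [← hw] at hsucc
            nlinarith [hle, hsucc, hneed]
          have hihres := ih (total - ((pvGroup xs w).length : Int) * w) p hle'
          rw [show total - ((pvGroup xs w).length : Int) * w - p
                = need - ((pvGroup xs w).length : Int) * w from by omega] at hihres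
          have htop : ((pvGroup xs w).reverse).drop (pvK cnt (v + 1) need w).toNat = [] := by
            rw [hKself, hmin, Int.toNat_natCast, List.drop_eq_nil_iff, List.length_reverse]
          have hflat : ((List.range (v + 88)).reverse).flatMap
                (fun (j : Nat) => ((pvGroup xs ((j : Int) - 87)).reverse).drop
                  (pvK cnt (v + 1) need ((j : Int) - 87)).toNat)
              = pvKept xs cnt v (need - ((pvGroup xs w).length : Int) * w) := by
            unfold pvKept
            refine List.flatMap_congr ?_
            intro j hj
            have hj' : (j : Int) - 87 ≤ (v : Int) := by
              rw [List.mem_reverse, List.mem_range] at hj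
              omega
            rw [hKlow _ hj', hmin]
          have hall := popLoop_group_all (total := total) p w (pvGroup xs w).reverse (pvDesc xs v)
            hgmem (by rw [List.length_reverse]; omega) hwpos
          rw [hdesc, hall, List.length_reverse, hihres, hkept, htop, List.nil_append, hflat]

-- ---- the kept list is the right-to-left pick ----
lemma pvPick_filter (w : Int) :
    ∀ (l : List (Char × Int × Int)) (r : Int → Int),
    (pvPick l r).filter (fun t => t.2.2 = w) =
      (l.filter (fun t => t.2.2 = w)).drop (r w).toNat := by

  intro l
  induction l with
  | nil => intro r; simp [pvPick]
  | cons t rest ih =>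
      intro r
      by_cases hrt : r t.2.2 > 0
      · rw [show pvPick (t :: rest) r
            = pvPick rest (fun u => if u = t.2.2 then r u - 1 else r u) from by
          simp [pvPick, hrt]]
        rw [ih]
        by_cases htw : t.2.2 = w
        · rw [List.filter_cons_of_pos (by simp [htw])]
          rw [if_pos htw.symm]
          rw [htw] at hrt
          rw [show (r w).toNat = (r w - 1).toNat + 1 by omega, List.drop_succ_cons]
        · rw [List.filter_cons_of_neg (by simp [htw])]
          rw [if_neg (fun he => htw he.symm)]
      · rw [show pvPick (t :: rest) r = t :: pvPick rest r from by simp [pvPick, hrt]]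
        by_cases htw : t.2.2 = w
        · rw [List.filter_cons_of_pos (by simp [htw]), List.filter_cons_of_pos (by simp [htw])]
          rw [htw] at hrt
          rw [show (r w).toNat = 0 by omega]
          simp [ih, show (r w).toNat = 0 by omega]
        · rw [List.filter_cons_of_neg (by simp [htw]), List.filter_cons_of_neg (by simp [htw])]
          exact ih r

lemma pvPick_sublist : ∀ (l : List (Char × Int × Int)) (r : Int → Int), (pvPick l r).Sublist l := by

  intro l
  induction l with
  | nil => intro r; simp [pvPick]
  | cons t rest ih =>
      intro r
      by_cases hrt : r t.2.2 > 0
      · rw [show pvPick (t :: rest) r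
            = pvPick rest (fun u => if u = t.2.2 then r u - 1 else r u) from by
          simp [pvPick, hrt]]
        exact (ih _).cons t
      · rw [show pvPick (t :: rest) r = t :: pvPick rest r from by simp [pvPick, hrt]]
        exact (ih r).cons₂ t

lemma flatMap_single {ι : Type} (g : ι → List (Char × Int × Int)) :
    ∀ (vs : List ι), vs.Nodup → ∀ w ∈ vs, (∀ u ∈ vs, u ≠ w → g u = []) →
    vs.flatMap g = g w := by
  intro vs
  induction vs with
  | nil => intro _ w hw; exact absurd hw (by simp)
  | cons v vs ih =>
      intro hnd w hw hz
      rw [List.nodup_cons] at hnd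
      rcases List.mem_cons.mp hw with rfl | hwv
      · rw [List.flatMap_cons, show vs.flatMap g = [] from List.flatMap_eq_nil_iff.mpr
          (fun u hu => hz u (List.mem_cons_of_mem _ hu) (fun he => hnd.1 (he ▸ hu))), List.append_nil]
      · have hvw : v ≠ w := fun he => hnd.1 (he ▸ hwv)
        rw [List.flatMap_cons, hz v List.mem_cons_self hvw, List.nil_append]
        exact ih hnd.2 w hwv (fun u hu => hz u (List.mem_cons_of_mem _ hu))

lemma pvKept_perm_pick (xs : List (Char × Int × Int)) (cnt : PySem.Dict Int Int) (need : Int)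
    (hval : ∀ t ∈ xs, -87 ≤ t.2.2 ∧ t.2.2 ≤ 30) :
    (pvKept xs cnt 30 need).Perm (pvPick xs.reverse (pvK cnt 30 need)) := by

  have hvs_nd : ((List.range 118).map (fun j : Nat => (j : Int) - 87)).Nodup :=
    (List.nodup_range).map (by intro a b hab; simp at hab; omega)
  have hfilt1 : ∀ v : Int, -87 ≤ v → v ≤ 30 →
      (pvKept xs cnt 30 need).filter (fun t => t.2.2 = v)
        = ((pvGroup xs v).reverse).drop (pvK cnt 30 need v).toNat := by
    intro v hv1 hv2
    unfold pvKept
    rw [List.filter_flatMap]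
    have hj0 : ((v + 87).toNat : Int) - 87 = v := by omega
    rw [flatMap_single _ _ (by rw [List.nodup_reverse]; exact List.nodup_range)
      (v + 87).toNat (by rw [List.mem_reverse, List.mem_range]; omega) ?hz]
    · rw [hj0]
      exact List.filter_eq_self.mpr (by
        intro t ht
        have := List.mem_filter.mp (List.mem_reverse.mp (List.mem_of_mem_drop ht))
        simpa using this.2)
    case hz =>
      intro u _ hu
      refine List.filter_eq_nil_iff.mpr ?_
      intro t ht
      have := List.mem_filter.mp (List.mem_reverse.mp (List.mem_of_mem_drop ht))
      simp only [decide_eq_true_eq] at this ⊢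
      intro he
      exact hu (by omega)
  have hmem1 : ∀ x ∈ pvKept xs cnt 30 need,
      x.2.2 ∈ (List.range 118).map (fun j : Nat => (j : Int) - 87) := by
    intro x hx
    unfold pvKept at hx
    rw [List.mem_flatMap] at hx
    obtain ⟨j, _, hxj⟩ := hx
    have hxg := List.mem_filter.mp (List.mem_reverse.mp (List.mem_of_mem_drop hxj))
    rcases hval x hxg.1 with ⟨h1, h2⟩
    rw [List.mem_map]
    exact ⟨(x.2.2 + 87).toNat, by rw [List.mem_range]; omega, by omega⟩
  have hmem2 : ∀ x ∈ pvPick xs.reverse (pvK cnt 30 need),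
      x.2.2 ∈ (List.range 118).map (fun j : Nat => (j : Int) - 87) := by
    intro x hx
    have hxm : x ∈ xs := List.mem_reverse.mp ((pvPick_sublist _ _).mem hx)
    rcases hval x hxm with ⟨h1, h2⟩
    rw [List.mem_map]
    exact ⟨(x.2.2 + 87).toNat, by rw [List.mem_range]; omega, by omega⟩
  have h1 := flatMap_filter_perm (fun t => t.2.2) _ hvs_nd (pvKept xs cnt 30 need) hmem1
  have h2 := flatMap_filter_perm (fun t => t.2.2) _ hvs_nd
    (pvPick xs.reverse (pvK cnt 30 need)) hmem2
  refine h1.symm.trans ?_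
  have heq : ((List.range 118).map (fun j : Nat => (j : Int) - 87)).flatMap
        (fun v => (pvKept xs cnt 30 need).filter (fun x => x.2.2 = v))
      = ((List.range 118).map (fun j : Nat => (j : Int) - 87)).flatMap
        (fun v => (pvPick xs.reverse (pvK cnt 30 need)).filter (fun x => x.2.2 = v)) := by
    refine List.flatMap_congr ?_
    intro v hv
    rw [List.mem_map] at hv
    obtain ⟨j, hj, rfl⟩ := hv
    rw [List.mem_range] at hj
    rw [hfilt1 _ (by omega) (by omega), pvPick_filter, List.filter_reverse]
    rfl
  rw [heq]
  exact h2

lemma sorted_idx_kept (xs : List (Char × Int × Int)) (cnt : PySem.Dict Int Int) (need : Int)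
    (hval : ∀ t ∈ xs, -87 ≤ t.2.2 ∧ t.2.2 ≤ 30)
    (hidx : xs.Pairwise (fun a b => a.2.1 < b.2.1)) :
    PySem.List.sorted (pvKept xs cnt 30 need).reverse (fun t => t.2.1) =
      (pvPick xs.reverse (pvK cnt 30 need)).reverse := by

  refine PySem.List.sorted_eq_of_perm_of_pairwise_lt _ _ (fun t : Char × Int × Int => t.2.1) ?_ ?_
  · exact (List.reverse_perm _).trans
      (((pvKept_perm_pick xs cnt need hval).symm).trans (List.reverse_perm _).symm)
  · rw [List.pairwise_reverse]
    have hrev : xs.reverse.Pairwise (fun a b => b.2.1 < a.2.1) := by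
      rw [List.pairwise_reverse]
      exact hidx.imp (fun h => h)
    exact (List.Pairwise.sublist (pvPick_sublist _ _) hrev).imp (fun h => h)

-- ---- the rebuild pass ----
lemma pvPickC_congr : ∀ (rs : List Char) (r r' : Int → Int),
    (∀ c ∈ rs, r (pvVal c) = r' (pvVal c)) → pvPickC rs r = pvPickC rs r' := by

  intro rs
  induction rs with
  | nil => intro r r' _; rfl
  | cons c rest ih =>
      intro r r' hag
      have hc := hag c List.mem_cons_self
      show (if r (pvVal c) > 0 then _ else _) = (if r' (pvVal c) > 0 then _ else _)
      rw [hc]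
      by_cases h : r' (pvVal c) > 0
      · rw [if_pos h, if_pos h]
        exact ih _ _ (fun d hd => by
          by_cases hdc : pvVal d = pvVal c
          · simp [hdc, hc]
          · simp [hdc, hag d (List.mem_cons_of_mem _ hd)])
      · rw [if_neg h, if_neg h, ih r r' (fun d hd => hag d (List.mem_cons_of_mem _ hd))]

lemma map_fst_pvPick : ∀ (l : List (Char × Int × Int)) (r : Int → Int),
    (∀ t ∈ l, t.2.2 = pvVal t.1) → (pvPick l r).map (fun t => t.1) = pvPickC (l.map (fun t => t.1)) r := by

  intro l
  induction l with
  | nil => intro r _; rfl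
  | cons t rest ih =>
      intro r h
      have ht := h t List.mem_cons_self
      show (pvPick (t :: rest) r).map (fun t => t.1)
        = (if r (pvVal t.1) > 0 then _ else _)
      rw [← ht]
      by_cases hrt : r t.2.2 > 0
      · rw [if_pos hrt,
          show pvPick (t :: rest) r
            = pvPick rest (fun u => if u = t.2.2 then r u - 1 else r u) from by
          simp [pvPick, hrt]]
        rw [ih _ (fun s hs => h s (List.mem_cons_of_mem _ hs)), ht]
      · rw [if_neg hrt, show pvPick (t :: rest) r = t :: pvPick rest r from by simp [pvPick, hrt]]
        rw [List.map_cons, ih _ (fun s hs => h s (List.mem_cons_of_mem _ hs))]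

lemma altRebuild_eq : ∀ (rs : List Char) (rem : PySem.Dict Int Int) (out : List Char),
    altRebuild rs rem out = out ++ pvPickC rs (fun w => rem.getD w 0) := by

  intro rs
  induction rs with
  | nil => intro rem out; simp [altRebuild, pvPickC]
  | cons c rest ih =>
      intro rem out
      show (if rem.getD ((c.toNat : Int) - 96) 0 > 0 then _ else _) = _
      by_cases h : rem.getD ((c.toNat : Int) - 96) 0 > 0
      · rw [if_pos h]
        rw [ih]
        have hfun : (fun w => (rem.insert ((c.toNat : Int) - 96)
              (rem.getD ((c.toNat : Int) - 96) 0 - 1)).getD w 0)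
            = (fun u => if u = pvVal c then (fun w => rem.getD w 0) u - 1
                else (fun w => rem.getD w 0) u) := by
          funext u
          rw [PySem.Dict.getD_insert]
          by_cases hu : u = (c.toNat : Int) - 96
          · simp [hu, pvVal]
          · simp [hu, show ¬ u = pvVal c from hu]
        rw [hfun]
        have hpc : pvPickC (c :: rest) (fun w => rem.getD w 0)
            = pvPickC rest (fun u => if u = pvVal c then (fun w => rem.getD w 0) u - 1
                else (fun w => rem.getD w 0) u) := by
          show (if (fun w => rem.getD w 0) (pvVal c) > 0 then _ else _) = _
          rw [if_pos (by simpa [pvVal] using h)]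
        rw [hpc]
      · rw [if_neg h]
        rw [ih]
        have hpc : pvPickC (c :: rest) (fun w => rem.getD w 0)
            = c :: pvPickC rest (fun w => rem.getD w 0) := by
          show (if (fun w => rem.getD w 0) (pvVal c) > 0 then _ else _) = _
          rw [if_neg (by simpa [pvVal] using h)]
        rw [hpc]
        simp

lemma altGreedy_getD (cnt : PySem.Dict Int Int) :
    ∀ (v : Nat) (need : Int) (rem : PySem.Dict Int Int),
    (∀ w : Int, w ≤ (v : Int) → rem.getD w 0 = 0) → ∀ w : Int,
    ((altGreedy cnt v need rem).1).getD w 0 =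
      if w ≤ (v : Int) then pvK cnt v need w else rem.getD w 0 := by

  intro v
  induction v with
  | zero =>
      intro need rem hrem w
      show rem.getD w 0 = _
      by_cases hw : w ≤ ((0:Nat) : Int)
      · rw [if_pos hw, hrem w hw]; rfl
      · rw [if_neg hw]
  | succ v ih =>
      intro need rem hrem w
      by_cases h0 : need ≤ 0
      · show (if need ≤ 0 then (rem, need) else _).1.getD w 0 = _
        rw [if_pos h0]
        by_cases hw : w ≤ ((v + 1 : Nat) : Int)
        · rw [if_pos hw, hrem w hw, pvK_of_nonpos _ _ _ _ h0]
        · rw [if_neg hw]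
      · show (if need ≤ 0 then (rem, need) else _).1.getD w 0 = _
        rw [if_neg h0]
        set k : Int := min (cnt.getD ((v : Int) + 1) 0)
          (-(PySem.Int.floordiv (-need) ((v : Int) + 1))) with hk
        have hKs : pvK cnt (v + 1) need ((v : Int) + 1) = k := by
          simp only [pvK, if_neg h0, pvCeil, hk]
          simp
        have hKl : ∀ u : Int, ¬ u = (v : Int) + 1 →
            pvK cnt (v + 1) need u = pvK cnt v (need - k * ((v : Int) + 1)) u := by
          intro u hu
          simp only [pvK, if_neg h0, if_neg hu, pvCeil, hk]
        by_cases hk0 : k ≠ 0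
        · rw [if_pos hk0]
          have hih := ih (need - k * ((v : Int) + 1))
            (rem.insert ((v : Int) + 1) k)
            (by
              intro u hu
              rw [PySem.Dict.getD_insert, if_neg (by omega)]
              exact hrem u (by push_cast; omega)) w
          rw [hih]
          by_cases hw1 : w ≤ (v : Int)
          · rw [if_pos hw1, if_pos (by push_cast; omega), hKl w (by omega)]
          · by_cases hw2 : w = (v : Int) + 1
            · rw [if_neg hw1, if_pos (by push_cast; omega), hw2, hKs,
                PySem.Dict.getD_insert, if_pos rfl]
            · rw [if_neg hw1, if_neg (by push_cast; omega),
                PySem.Dict.getD_insert, if_neg hw2]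
        · rw [if_neg hk0]
          rw [not_not] at hk0
          have hih := ih need rem (fun u hu => hrem u (by push_cast; omega)) w
          rw [hih]
          by_cases hw1 : w ≤ (v : Int)
          · rw [if_pos hw1, if_pos (by push_cast; omega), hKl w (by omega), hk0]
            rw [show need - 0 * ((v : Int) + 1) = need by ring]
          · by_cases hw2 : w = (v : Int) + 1
            · rw [if_neg hw1, if_pos (by push_cast; omega), hw2, hKs, hk0,
                hrem ((v : Int) + 1) (by push_cast; omega)]
            · rw [if_neg hw1, if_neg (by push_cast; omega)]


-- ---- sum split (Pre_ gives the loop precondition) ----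
lemma sum_split (xs : List (Char × Int × Int)) (h : ∀ t ∈ xs, t.2.2 ≤ 30) :
    (xs.map (fun t => t.2.2)).sum =
      pvPosSum xs 30 + ((xs.map (fun t => t.2.2)).filter (fun v => v < 0)).sum := by

  induction xs with
  | nil => simp [pvPosSum]
  | cons t rest ih =>
      have ht := h t List.mem_cons_self
      have ihr := ih (fun s hs => h s (List.mem_cons_of_mem _ hs))
      unfold pvPosSum at ihr ⊢
      simp only [List.map_cons, List.filter_cons]
      by_cases h1 : 1 ≤ t.2.2
      · rw [if_pos (by simp; omega), if_neg (by simp; omega)]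
        simp only [List.map_cons, List.sum_cons]
        omega
      · by_cases h2 : t.2.2 < 0
        · rw [if_neg (by simp; omega), if_pos (by simp; omega)]
          simp only [List.sum_cons]
          omega
        · rw [if_neg (by simp; omega), if_neg (by simp; omega)]
          simp only [List.sum_cons]
          omega

lemma map_val_pvTriples (cs : List Char) :
    (pvTriples cs).map (fun t => t.2.2) = cs.map pvVal := by

  rw [pvTriples, List.map_map]
  conv_rhs => rw [← PySem.List.map_snd_enumerate cs 0, List.map_map]
  rfl

-- ===== VERDICT (by name: the statement is the Claim_ definition above) =====
theorem cheap_spec : Claim_equal_cheap := by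
  intro word p hdom hpre
  unfold Spec_cheap
  unfold Dom_cheap at hdom
  unfold Pre_cheap at hpre
  have hdomc : ∀ c ∈ word.toList, 9 ≤ c.toNat ∧ c.toNat ≤ 126 := by
    intro c hc
    simp only [Bool.and_eq_true, pvDomStr, List.all_eq_true] at hdom
    have := hdom.1 c hc
    simp [pvDomChar] at this
    omega
  have hbound : ∀ t ∈ pvTriples word.toList, -87 ≤ t.2.2 ∧ t.2.2 ≤ 30 := by
    intro t ht
    have hv := snd_snd_pvTriples word.toList t ht
    have hmem : t.1 ∈ word.toList := by
      rw [← map_fst_pvTriples word.toList]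
      exact List.mem_map_of_mem ht
    have := hdomc t.1 hmem
    rw [hv]
    unfold pvVal
    omega
  have hcnt : ∀ w : Int, 1 ≤ w →
      (pvCnt word.toList).getD w 0 = ((pvGroup (pvTriples word.toList) w).length : Int) := by
    intro w _
    rw [pvCnt_getD, length_pvGroup]
  have hpre' : (((word.toList.map pvVal).filter (fun v => v < 0)).sum : Int) ≤ p := hpre
  have hsplit := sum_split (pvTriples word.toList) (fun t ht => (hbound t ht).2)
  rw [map_val_pvTriples] at hsplit
  have hneed : (word.toList.map pvVal).sum - p ≤ pvPosSum (pvTriples word.toList) 30 := by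
    omega
  have hvalrev : ∀ t ∈ (pvTriples word.toList).reverse, t.2.2 = pvVal t.1 := by
    intro t ht
    exact snd_snd_pvTriples word.toList t (List.mem_reverse.mp ht)
  -- A's value
  have hA : cheap word p = String.ofList
      ((pvPickC word.toList.reverse
        (pvK (pvCnt word.toList) 30 ((word.toList.map pvVal).sum - p))).reverse) := by
    unfold cheap
    simp only [cheapBuild_eq]
    rw [sorted_val_eq_pvAsc word.toList hbound, pvAsc_reverse,
      popLoop_desc _ _ hcnt 30 _ _ hneed]
    show String.ofList
        ((PySem.List.sorted (pvKept (pvTriples word.toList) (pvCnt word.toList) 30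
            ((word.toList.map pvVal).sum - p)).reverse (fun x => x.2.1)).foldl
          (fun res t => res ++ [t.1]) []) = _
    rw [sorted_idx_kept _ _ _ hbound (pairwise_idx_pvTriples word.toList)]
    rw [PySem.List.foldl_append_singleton_eq_map (fun t : Char × Int × Int => t.1)]
    rw [List.nil_append, List.map_reverse]
    rw [map_fst_pvPick _ _ hvalrev]
    rw [List.map_reverse, map_fst_pvTriples]
  -- B's value
  have hgetD := altGreedy_getD (pvCnt word.toList) 30 ((word.toList.map pvVal).sum - p)
    PySem.Dict.empty (by intro w _; rfl)
  have hB : cheap_alt word p = String.ofList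
      ((pvPickC word.toList.reverse
        (pvK (pvCnt word.toList) 30 ((word.toList.map pvVal).sum - p))).reverse) := by
    unfold cheap_alt
    simp only [altCount_eq]
    rw [altRebuild_eq, List.nil_append]
    have hfun : pvPickC word.toList.reverse
        (fun w => (altGreedy (pvCnt word.toList) 30 ((word.toList.map pvVal).sum - p)
          PySem.Dict.empty).1.getD w 0)
        = pvPickC word.toList.reverse
            (pvK (pvCnt word.toList) 30 ((word.toList.map pvVal).sum - p)) := by
      refine pvPickC_congr _ _ _ ?_
      intro c hc
      rw [hgetD (pvVal c)]
      have hcb := hdomc c (List.mem_reverse.mp hc)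
      rw [if_pos (by unfold pvVal; omega)]
    rw [hfun]
  rw [hA, hB]
theorem cheap_raises : Claim_raises_cheap := by
  unfold Claim_raises_cheap
  exact ⟨fun w p _ h hpre => by unfold Raises_cheap at h; unfold Pre_cheap at hpre; omega, by decide⟩

-- self-check: the universal half of Claim_raises_cheap, usable on its own
theorem cheap_raises_disjoint_ok :
    ∀ (word : String) (p : Int), Dom_cheap word p → Raises_cheap word p → ¬ Pre_cheap word p :=
  cheap_raises.1
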